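-- pv_equiv track=rewrite | github.com/Alyndiar/GameManager | gamemanager/services/storefronts/epic_connector.py | _catalog_batch_count
-- ===== SOURCE A (Python) =====
-- _EGS_CATALOG_BATCH_SIZE = 40
--
-- def _batch_catalog_ids(
--     ids: list[str],
--     *,
--     batch_size: int = _EGS_CATALOG_BATCH_SIZE,
-- ) -> list[list[str]]:
--     unique: list[str] = []
--     seen: set[str] = set()
--     for raw in ids:
--         token = str(raw or "").strip()
--         if not token:
--             continue
--         key = token.casefold()
--         if key in seen:
--             continue
--         seen.add(key)
--         unique.append(token)
--     if not unique:
--         return []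
--     size = max(1, int(batch_size))
--     return [unique[idx : idx + size] for idx in range(0, len(unique), size)]
--
-- def _catalog_batch_count(missing_keys: list[tuple[str, str]]) -> int:
--     grouped: dict[str, list[str]] = {}
--     for namespace, catalog_item_id in missing_keys:
--         ns = str(namespace or "").strip()
--         item_id = str(catalog_item_id or "").strip()
--         if not ns or not item_id:
--             continue
--         grouped.setdefault(ns, []).append(item_id)
--     total = 0
--     for ids in grouped.values():
--         total += len(_batch_catalog_ids(ids))
--     return total
-- ===== SOURCE B (Python) =====
-- _EGS_CATALOG_BATCH_SIZE = 40
--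
-- def _catalog_batch_count(missing_keys):
--     grouped = {}
--     for namespace, catalog_item_id in missing_keys:
--         ns = str(namespace or "").strip()
--         item_id = str(catalog_item_id or "").strip()
--         if not ns or not item_id:
--             continue
--         grouped.setdefault(ns, set()).add(item_id.casefold())
--     return sum(
--         (len(tokens) + _EGS_CATALOG_BATCH_SIZE - 1) // _EGS_CATALOG_BATCH_SIZE
--         for tokens in grouped.values()
--     )
-- ===== Notes on version B (the rewrite author's own statement) =====
-- stated objective: simpler
-- what changed: B groups directly into per-namespace sets of casefolded item tokens and returns sum((len(s)+39)//40), replacing A's per-namespace dedup list + materialised 40-element sublists with a closed-form ceiling division.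
import Mathlib
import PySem

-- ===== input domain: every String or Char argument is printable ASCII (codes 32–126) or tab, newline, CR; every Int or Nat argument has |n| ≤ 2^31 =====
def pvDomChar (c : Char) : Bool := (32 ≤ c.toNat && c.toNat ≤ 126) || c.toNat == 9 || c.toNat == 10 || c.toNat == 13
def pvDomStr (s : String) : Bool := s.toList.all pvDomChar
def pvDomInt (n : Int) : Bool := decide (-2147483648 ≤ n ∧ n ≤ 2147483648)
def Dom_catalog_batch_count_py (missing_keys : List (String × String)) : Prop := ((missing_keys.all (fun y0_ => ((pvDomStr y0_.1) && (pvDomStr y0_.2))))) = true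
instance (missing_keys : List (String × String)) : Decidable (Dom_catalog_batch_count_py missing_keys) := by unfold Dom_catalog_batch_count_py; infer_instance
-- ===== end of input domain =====

-- B replaces A's per-namespace dedup list + materialised 40-element sublists by per-namespace
-- sets of casefolded tokens and a closed-form ceiling division (simpler; same O(n) cost).
-- casefold is ported as PySem.Chars.lower, exact on the ASCII domain.

-- ===== PORT A =====
-- one step of the dedup loop in _batch_catalog_ids (state: (unique, seen))
def pvBatchStep (st : List (List Char) × PySem.Set (List Char)) (raw : List Char) :
    List (List Char) × PySem.Set (List Char) :=
  let token := PySem.Chars.strip raw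
  if token = [] then st
  else
    let key := PySem.Chars.lower token
    if PySem.Set.contains st.2 key then st
    else (st.1 ++ [token], PySem.Set.add st.2 key)

-- port of _batch_catalog_ids with the default batch_size = 40
def pvBatchCatalogIds (ids : List (List Char)) : List (List (List Char)) :=
  let unique := (ids.foldl pvBatchStep ([], PySem.Set.empty)).1
  if unique = [] then []
  else
    let size : Int := max 1 40
    (PySem.List.pyRange 0 (unique.length : Int) size).map
      (fun idx => PySem.List.slice unique (some idx) (some (idx + size)))

-- the grouping loop of _catalog_batch_count (dict ns -> list of item ids)
def pvGroupedA (missing_keys : List (String × String)) :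
    PySem.Dict (List Char) (List (List Char)) :=
  missing_keys.foldl
    (fun d kv =>
      let ns := PySem.Chars.strip kv.1.toList
      let item := PySem.Chars.strip kv.2.toList
      if ns = [] ∨ item = [] then d
      else d.insert ns (d.getD ns [] ++ [item]))
    PySem.Dict.empty

def catalog_batch_count_py (missing_keys : List (String × String)) : Int :=
  (pvGroupedA missing_keys).values.foldl
    (fun total ids => total + ((pvBatchCatalogIds ids).length : Int)) 0

-- ===== PORT B =====
-- the grouping loop of B (dict ns -> set of casefolded item ids)
def pvGroupedB (missing_keys : List (String × String)) :
    PySem.Dict (List Char) (PySem.Set (List Char)) :=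
  missing_keys.foldl
    (fun d kv =>
      let ns := PySem.Chars.strip kv.1.toList
      let item := PySem.Chars.strip kv.2.toList
      if ns = [] ∨ item = [] then d
      else d.insert ns (PySem.Set.add (d.getD ns PySem.Set.empty) (PySem.Chars.lower item)))
    PySem.Dict.empty

def catalog_batch_count_py_alt (missing_keys : List (String × String)) : Int :=
  ((pvGroupedB missing_keys).values.map
    (fun s => PySem.Int.floordiv (PySem.Set.len s + (40 - 1)) 40)).sum

-- ===== PRECONDITION & SPEC =====
def Spec_catalog_batch_count_py (missing_keys : List (String × String)) (out : Int) : Prop := out = catalog_batch_count_py_alt missing_keys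
instance (missing_keys : List (String × String)) (out : Int) : Decidable (Spec_catalog_batch_count_py missing_keys out) := by unfold Spec_catalog_batch_count_py; infer_instance

-- ===== CLAIM (what is proved, stated in full; the proofs are below) =====
def Claim_equal_catalog_batch_count_py : Prop := ∀ (missing_keys : List (String × String)), Dom_catalog_batch_count_py missing_keys → Spec_catalog_batch_count_py missing_keys (catalog_batch_count_py missing_keys)

-- ===== LEMMAS AND PROOFS =====

-- strip is idempotent
theorem pv_dropWhile_idem {p : Char → Bool} (x : List Char) :
    List.dropWhile p (List.dropWhile p x) = List.dropWhile p x := by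
  cases h : List.dropWhile p x with
  | nil => simp
  | cons a t =>
      have ha : p a = false := by
        have hne : List.dropWhile p x ≠ [] := by simp [h]
        have := List.head_dropWhile_not p hne
        simpa [h] using this
      simp [List.dropWhile, ha]

theorem pv_dropWhile_getLast? {p : Char → Bool} (l : List Char)
    (h : List.dropWhile p l ≠ []) :
    (List.dropWhile p l).getLast? = l.getLast? := by
  obtain ⟨t, ht⟩ := List.dropWhile_suffix p (l := l)
  conv_rhs => rw [← ht]
  exact (List.getLast?_append_of_ne_nil t h).symm

theorem pv_strip_idem (x : List Char) :
    PySem.Chars.strip (PySem.Chars.strip x) = PySem.Chars.strip x := by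
  simp only [PySem.Chars.strip, PySem.Chars.lstrip, PySem.Chars.rstrip]
  set p := PySem.Chars.isspace
  set z := (List.dropWhile p (List.dropWhile p x).reverse).reverse with hz
  have hdz : List.dropWhile p z = z := by
    cases hzc : z with
    | nil => simp
    | cons a t =>
        have hhead : p a = false := by
          have h1 : z.head? = some a := by rw [hzc]; rfl
          have hne : List.dropWhile p (List.dropWhile p x).reverse ≠ [] := by
            intro h; rw [hz, h] at hzc; simp at hzc
          have h2 : z.head? = (List.dropWhile p x).head? := by
            rw [hz, List.head?_reverse, pv_dropWhile_getLast? _ hne,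
              List.getLast?_reverse]
          cases hdx : List.dropWhile p x with
          | nil => rw [hdx] at h2; rw [h2] at h1; simp at h1
          | cons b s =>
              have hb : p b = false := by
                have hne2 : List.dropWhile p x ≠ [] := by simp [hdx]
                have := List.head_dropWhile_not p hne2
                simpa [hdx] using this
              rw [hdx] at h2; simp at h2; rw [h2] at h1
              simp at h1; rw [← h1]; exact hb
        simp [List.dropWhile, hhead]
  rw [hdz]
  have hzr : z.reverse = List.dropWhile p (List.dropWhile p x).reverse := by
    rw [hz, List.reverse_reverse]
  rw [hzr, pv_dropWhile_idem, ← hzr, List.reverse_reverse]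

-- the dedup loop of A: the seen-set is the fold of add over the casefolded ids,
-- and unique stays as long as seen
theorem pv_batch_fold (ids : List (List Char)) (u : List (List Char)) (s : PySem.Set (List Char))
    (hids : ∀ x ∈ ids, PySem.Chars.strip x = x ∧ x ≠ [])
    (hlen : u.length = s.length) :
    (ids.foldl pvBatchStep (u, s)).1.length
      = ((ids.map PySem.Chars.lower).foldl PySem.Set.add s).length := by
  induction ids generalizing u s with
  | nil => simpa using hlen
  | cons x tl ih =>
      obtain ⟨hst, hne⟩ := hids x (by simp)
      have htl : ∀ y ∈ tl, PySem.Chars.strip y = y ∧ y ≠ [] := fun y hy => hids y (by simp [hy])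
      simp only [List.foldl_cons, List.map_cons]
      by_cases hc : PySem.Set.contains s (PySem.Chars.lower x) = true
      · have hmem : PySem.Chars.lower x ∈ s := by
          simpa [PySem.Set.contains] using hc
        have h1 : pvBatchStep (u, s) x = (u, s) := by
          simp [pvBatchStep, hst, hne, hmem]
        have h2 : PySem.Set.add s (PySem.Chars.lower x) = s := by
          simp [PySem.Set.add, PySem.Set.contains, hmem]
        rw [h1, h2]; exact ih u s htl hlen
      · have hmem : PySem.Chars.lower x ∉ s := by
          simpa [PySem.Set.contains] using hc
        have h1 : pvBatchStep (u, s) x = (u ++ [x], s ++ [PySem.Chars.lower x]) := by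
          simp [pvBatchStep, hst, hne, PySem.Set.add, hmem]
        have h2 : PySem.Set.add s (PySem.Chars.lower x) = s ++ [PySem.Chars.lower x] := by
          simp [PySem.Set.add, PySem.Set.contains, hmem]
        rw [h1, h2]
        exact ih _ _ htl (by simp [hlen])

-- number of batches = ceil(|set of casefolded ids| / 40)
theorem pv_batch_count (ids : List (List Char))
    (hids : ∀ x ∈ ids, PySem.Chars.strip x = x ∧ x ≠ []) :
    ((pvBatchCatalogIds ids).length : Int)
      = PySem.Int.floordiv (((PySem.Set.ofList (ids.map PySem.Chars.lower)).length : Int) + 39) 40 := by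
  have hfold := pv_batch_fold ids [] PySem.Set.empty hids rfl
  rw [PySem.Set.ofList_eq_foldl]
  simp only [pvBatchCatalogIds]
  set unique := (ids.foldl pvBatchStep ([], PySem.Set.empty)).1 with hu
  set n := ((ids.map PySem.Chars.lower).foldl PySem.Set.add []).length with hn
  have hulen : unique.length = n := hfold
  by_cases hnil : unique = []
  · have hzero : n = 0 := by rw [← hulen, hnil]; rfl
    rw [hzero, if_pos hnil]
    decide
  · have hpos : 0 < n := by
      rw [← hulen]; exact List.length_pos_of_ne_nil hnil
    rw [if_neg hnil]
    have hsize : (max 1 40 : Int) = 40 := by decide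
    simp only [hsize]
    rw [List.length_map,
      PySem.List.pyRange_of_pos 0 (unique.length : Int) (by decide : (0:Int) < 40),
      List.length_map, List.length_range]
    have hlt : (0 : Int) < (unique.length : Int) := by
      have := hulen; omega
    rw [if_pos hlt, hulen,
      PySem.Int.floordiv_eq_ediv_of_pos (by decide : (0:Int) < 40)]
    have h40 : ((n : Int) - 0 + 40 - 1) = (n : Int) + 39 := by ring
    rw [h40]
    have hnn : (0 : Int) ≤ ((n : Int) + 39) / 40 := by positivity
    omega

-- find? over a snd-mapped association list
theorem pv_find?_map {β γ : Type} (g : β → γ) (l : List (List Char × β)) (k : List Char) :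
    List.find? (fun p => p.1 == k) (l.map (fun p => (p.1, g p.2)))
      = (List.find? (fun p => p.1 == k) l).map (fun p => (p.1, g p.2)) := by
  induction l with
  | nil => rfl
  | cons a tl ih =>
      by_cases h : (a.1 == k) = true
      · simp [List.find?, h]
      · simp only [List.map_cons, List.find?]
        simp only [h]
        simpa [h] using ih

-- Set.ofList over an appended singleton
theorem pv_ofList_append_singleton (l : List (List Char)) (x : List Char) :
    PySem.Set.ofList (l ++ [x]) = PySem.Set.add (PySem.Set.ofList l) x := by
  rw [PySem.Set.ofList_eq_foldl, PySem.Set.ofList_eq_foldl, List.foldl_append]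
  rfl

-- value map carried through one grouped-insert step
def pvG (ids : List (List Char)) : PySem.Set (List Char) :=
  PySem.Set.ofList (ids.map PySem.Chars.lower)

theorem pv_group_invariant (missing_keys : List (String × String))
    (dA : PySem.Dict (List Char) (List (List Char)))
    (dB : PySem.Dict (List Char) (PySem.Set (List Char)))
    (hitems : dB.items = dA.items.map (fun p => (p.1, pvG p.2)))
    (hvals : ∀ p ∈ dA.items, ∀ x ∈ p.2, PySem.Chars.strip x = x ∧ x ≠ []) :
    (missing_keys.foldl
        (fun d kv =>
          let ns := PySem.Chars.strip kv.1.toList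
          let item := PySem.Chars.strip kv.2.toList
          if ns = [] ∨ item = [] then d
          else d.insert ns (PySem.Set.add (d.getD ns PySem.Set.empty) (PySem.Chars.lower item)))
        dB).items
      = ((missing_keys.foldl
          (fun d kv =>
            let ns := PySem.Chars.strip kv.1.toList
            let item := PySem.Chars.strip kv.2.toList
            if ns = [] ∨ item = [] then d
            else d.insert ns (d.getD ns [] ++ [item]))
          dA).items).map (fun p => (p.1, pvG p.2))
      ∧ ∀ p ∈ (missing_keys.foldl
          (fun d kv =>
            let ns := PySem.Chars.strip kv.1.toList
            let item := PySem.Chars.strip kv.2.toList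
            if ns = [] ∨ item = [] then d
            else d.insert ns (d.getD ns [] ++ [item]))
          dA).items, ∀ x ∈ p.2, PySem.Chars.strip x = x ∧ x ≠ [] := by
  induction missing_keys generalizing dA dB with
  | nil => exact ⟨hitems, hvals⟩
  | cons kv tl ih =>
      simp only [List.foldl_cons]
      set ns := PySem.Chars.strip kv.1.toList with hns
      set item := PySem.Chars.strip kv.2.toList with hitem
      by_cases hskip : ns = [] ∨ item = []
      · simp only [if_pos hskip]
        exact ih dA dB hitems hvals
      · simp only [if_neg hskip]
        obtain ⟨hns0, hitem0⟩ := not_or.mp hskip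
        -- relate lookups
        have hcont : dB.contains ns = dA.contains ns := by
          simp only [PySem.Dict.contains, hitems, List.any_map]
          rfl
        have hget : dB.getD ns PySem.Set.empty = pvG (dA.getD ns []) := by
          simp only [PySem.Dict.getD, PySem.Dict.get?, hitems, pv_find?_map]
          cases h : List.find? (fun p => p.1 == ns) dA.items with
          | none => simp [pvG, PySem.Set.empty]
          | some p => simp
        have hval : PySem.Set.add (dB.getD ns PySem.Set.empty) (PySem.Chars.lower item)
            = pvG (dA.getD ns [] ++ [item]) := by
          rw [hget, pvG, pvG, List.map_append, List.map_singleton,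
            pv_ofList_append_singleton]
        -- relate the two inserts itemwise
        have hins : (dB.insert ns (PySem.Set.add (dB.getD ns PySem.Set.empty)
              (PySem.Chars.lower item))).items
            = ((dA.insert ns (dA.getD ns [] ++ [item])).items).map (fun p => (p.1, pvG p.2)) := by
          rw [hval]
          simp only [PySem.Dict.insert, hcont]
          by_cases hc : dA.contains ns = true
          · simp only [hc, if_pos, hitems, List.map_map]
            congr 1
            funext p
            by_cases hp : (p.1 == ns) = true
            · simp [Function.comp, hp]
            · simp [Function.comp, hp]
          · simp only [hc, hitems]
            simp
        apply ih
        · exact hins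
        · -- values of the new dA still stripped and nonempty
          intro p hp x hx
          simp only [PySem.Dict.insert] at hp
          by_cases hc : dA.contains ns = true
          · simp only [hc, if_pos] at hp
            simp only [List.mem_map] at hp
            obtain ⟨q, hq, hqe⟩ := hp
            by_cases hqns : (q.1 == ns) = true
            · rw [if_pos hqns] at hqe
              rw [← hqe] at hx
              simp only at hx
              rcases List.mem_append.mp hx with hxl | hxr
              · -- x in old value at ns
                cases hfind : List.find? (fun r => r.1 == ns) dA.items with
                | none => simp [PySem.Dict.getD, PySem.Dict.get?, hfind] at hxl
                | some r =>
                    have hrmem := List.mem_of_find?_eq_some hfind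
                    have := hvals r hrmem
                    apply this
                    simpa [PySem.Dict.getD, PySem.Dict.get?, hfind] using hxl
              · have hxi : x = item := by simpa using hxr
                subst hxi
                exact ⟨pv_strip_idem _, hitem0⟩
            · rw [if_neg hqns] at hqe
              subst hqe
              exact hvals q hq x hx
          · simp only [hc] at hp
            rcases List.mem_append.mp hp with hpl | hpr
            · exact hvals p hpl x hx
            · have : p = (ns, dA.getD ns [] ++ [item]) := by simpa using hpr
              subst this
              simp only at hx
              rcases List.mem_append.mp hx with hxl | hxr
              · -- contains false means find? none, so getD = []
                have hfind : List.find? (fun r => r.1 == ns) dA.items = none := by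
                  rw [List.find?_eq_none]
                  intro r hr hre
                  have : dA.contains ns = true := by
                    simp only [PySem.Dict.contains, List.any_eq_true]
                    exact ⟨r, hr, hre⟩
                  exact hc this
                simp [PySem.Dict.getD, PySem.Dict.get?, hfind] at hxl
              · have hxi : x = item := by simpa using hxr
                subst hxi
                exact ⟨pv_strip_idem _, hitem0⟩

-- ===== VERDICT (by name: the statement is the Claim_ definition above) =====
theorem catalog_batch_count_py_spec : Claim_equal_catalog_batch_count_py := by
  intro missing_keys _
  unfold Spec_catalog_batch_count_py catalog_batch_count_py catalog_batch_count_py_alt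
  have hinv := pv_group_invariant missing_keys PySem.Dict.empty PySem.Dict.empty rfl
    (by intro p hp; simp [PySem.Dict.empty] at hp)
  obtain ⟨hitems, hvals⟩ := hinv
  unfold pvGroupedA pvGroupedB
  rw [PySem.List.foldl_add]
  simp only [PySem.Dict.values, hitems, List.map_map]
  rw [zero_add]
  congr 1
  apply List.map_congr_left
  intro p hp
  simp only [Function.comp]
  have := pv_batch_count p.2 (hvals p hp)
  rw [this]
  simp [pvG, PySem.Set.len]
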